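-- pv_equiv track=rewrite | github.com/jennywoites/MUSSA | MUSSA_Flask/tests/api/TestBuscarCarreras.py | obtener_carreras
-- ===== SOURCE A (Python) =====
-- def obtener_carreras(carreras):
--     licenciatura = None
--     ingenieria = None
--
--     for carrera in carreras:
--         if carrera["codigo"] == '9':
--             licenciatura = carrera
--         if carrera["codigo"] == '10':
--             ingenieria = carrera
--
--     return ingenieria, licenciatura
-- ===== SOURCE B (Python) =====
-- def obtener_carreras(carreras):
--     def ultima_con_codigo(codigo):
--         for carrera in reversed(carreras):
--             if carrera["codigo"] == codigo:
--                 return carrera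
--         return None
--     return ultima_con_codigo('10'), ultima_con_codigo('9')
-- ===== Notes on version B (the rewrite author's own statement) =====
-- stated objective: alternative
-- what changed: Replaces A's single forward pass maintaining two last-wins accumulators with two staged backward scans (reversed iteration) that early-return the first match for each codigo and keep no accumulator state.
import Mathlib
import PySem

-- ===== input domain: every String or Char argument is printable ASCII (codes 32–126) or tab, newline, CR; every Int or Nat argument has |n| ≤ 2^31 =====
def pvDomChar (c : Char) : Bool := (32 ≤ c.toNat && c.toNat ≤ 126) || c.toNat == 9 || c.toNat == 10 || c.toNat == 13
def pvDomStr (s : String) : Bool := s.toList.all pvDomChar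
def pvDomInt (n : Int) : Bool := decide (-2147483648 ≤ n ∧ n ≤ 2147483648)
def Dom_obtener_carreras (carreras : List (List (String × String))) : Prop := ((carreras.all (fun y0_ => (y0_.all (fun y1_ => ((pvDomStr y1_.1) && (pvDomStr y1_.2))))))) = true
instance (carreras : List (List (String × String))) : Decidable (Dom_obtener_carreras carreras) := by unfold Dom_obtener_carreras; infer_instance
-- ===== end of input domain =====

-- B replaces A's forward pass with two last-wins accumulators by two staged backward
-- scans that early-return the first match for each codigo (objective: alternative; same cost).

-- shared primitive: Python's carrera["codigo"] on an association-list dict (first match)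
def pvKeyGet? (c : List (String × String)) : Option String :=
  (c.find? (fun p => p.1 == "codigo")).map Prod.snd

-- ===== PORT A =====
-- loop: for carrera in carreras: if c["codigo"]=='9': lic = c; if c["codigo"]=='10': ing = c
def obtener_carreras (carreras : List (List (String × String))) : (Option (List (String × String))) × (Option (List (String × String))) :=
  let st := carreras.foldl (fun (s : Option (List (String × String)) × Option (List (String × String))) c =>
    let s1 := if pvKeyGet? c == some "9" then (some c, s.2) else s
    if pvKeyGet? c == some "10" then (s1.1, some c) else s1) (none, none)
  (st.2, st.1)

-- ===== PORT B =====
-- helper: for carrera in reversed(carreras): if carrera["codigo"] == codigo: return carrera; return None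
-- (the for-with-early-return over the reversed list is exactly find? on carreras.reverse)
def ultima_con_codigo (carreras : List (List (String × String))) (codigo : String) : Option (List (String × String)) :=
  carreras.reverse.find? (fun c => pvKeyGet? c == some codigo)

def obtener_carreras_alt (carreras : List (List (String × String))) : (Option (List (String × String))) × (Option (List (String × String))) :=
  (ultima_con_codigo carreras "10", ultima_con_codigo carreras "9")

-- ===== PRECONDITION & SPEC =====
-- Pre_ excludes inputs where some carrera lacks the key "codigo": there Python A raises
-- KeyError (and Python B may too); exactly those inputs are excluded.
def Pre_obtener_carreras (carreras : List (List (String × String))) : Prop :=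
  ∀ c ∈ carreras, (pvKeyGet? c).isSome = true
instance (carreras : List (List (String × String))) : Decidable (Pre_obtener_carreras carreras) := by unfold Pre_obtener_carreras; infer_instance
def pvWitness_obtener_carreras : (List (List (String × String))) :=
  [[("codigo", "9"), ("nombre", "Lic")], [("codigo", "10")]]
def Spec_obtener_carreras (carreras : List (List (String × String))) (out : (Option (List (String × String))) × (Option (List (String × String)))) : Prop := out = obtener_carreras_alt carreras
instance (carreras : List (List (String × String))) (out : (Option (List (String × String))) × (Option (List (String × String)))) : Decidable (Spec_obtener_carreras carreras out) := by unfold Spec_obtener_carreras; infer_instance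

-- ===== CLAIM (what is proved, stated in full; the proofs are below) =====
def Claim_equal_obtener_carreras : Prop := ∀ (carreras : List (List (String × String))), Dom_obtener_carreras carreras → Pre_obtener_carreras carreras → Spec_obtener_carreras carreras (obtener_carreras carreras)

-- ===== LEMMAS AND PROOFS =====

-- loop invariant: A's accumulators are the first backward match, falling back to the init
theorem pv_inv (l : List (List (String × String))) :
    ∀ (s : Option (List (String × String)) × Option (List (String × String))),
      l.foldl (fun (s : Option (List (String × String)) × Option (List (String × String))) c =>
          let s1 := if pvKeyGet? c == some "9" then (some c, s.2) else s
          if pvKeyGet? c == some "10" then (s1.1, some c) else s1) s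
        = ((l.reverse.find? (fun c => pvKeyGet? c == some "9")).or s.1,
           (l.reverse.find? (fun c => pvKeyGet? c == some "10")).or s.2) := by
  induction l with
  | nil => intro s; simp
  | cons c l ih =>
    intro s
    simp only [List.foldl_cons, List.reverse_cons, List.find?_append, ih]
    cases h9 : (pvKeyGet? c == some "9") <;>
      cases h10 : (pvKeyGet? c == some "10") <;>
        simp [h9, h10, List.find?]
  
-- ===== VERDICT (by name: the statement is the Claim_ definition above) =====
theorem obtener_carreras_spec : Claim_equal_obtener_carreras := by
  intro carreras _ _
  show obtener_carreras carreras = obtener_carreras_alt carreras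
  unfold obtener_carreras obtener_carreras_alt ultima_con_codigo
  simp only [pv_inv, Option.or_none]
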